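/- GENERATED by farm/mkstatement.py from design/units.tsv (unit `DGifGetExtension.1`) and the assertions of Gif/Spec/Seg_DGifGetExtension.lean — do not edit.
   THE STATEMENT of the proof unit `DGifGetExtension.1`: segment 1 of `DGifGetExtension` (23 instructions; entries 0x109aca;
   exits 0x109afb,0x109b45; ranges 0x109aca-0x109afb,0x109b16-0x109b45)
   takes each of its entry assertions to one of its exit assertions (`Gif.Spec.DGifGetExtension.Seg1`), given the contracts of its callees.
   What the names mean: ProgX/Base/Spec/Basic.lean (the shared hypotheses), Gif/Spec/Seg_DGifGetExtension.lean (the assertions). The theorem to prove: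
   `theorem DGifGetExtension_1_ok : Gif.Spec.DGifGetExtension_1.Statement`. -/
import Gif.Code
import Gif.Dec.All
import Gif.Labels
import Gif.Spec.Reader
import Gif.Spec.Seg_DGifGetExtension
namespace Gif.Spec.DGifGetExtension_1
open X86 X86.User Asan

/-- The statement of unit `DGifGetExtension.1`. -/
def Statement : Prop :=
  ∀ (Lay : Layout) (_hLay : Lay.hi = 0x1000000) (μ : Microarch) (_hμ : UserX.MicroOK μ) (u₀ : State)
    (_hcode : HasCodeNat Lay u₀ Gif.L.DGifGetExtension.entry Gif.Code.code_DGifGetExtension.nat Gif.L.DGifGetExtension.size)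
    (_h_InternalRead : ∀ (H : Heap) (rest : List Obj) (frames : List (Nat × FrameLayout)) (F : Forest) (R : Rd) (n : Nat), Calls Lay μ ProgX.Base.WayInv (ProgX.Base.conv u₀) Gif.L.InternalRead.entry (Gif.Spec.InternalRead.spec H rest frames F R n))
    (_h_asan_load8_noabort : Asan.SmallCheck Lay μ ProgX.Base.WayInv (ProgX.Base.CodeOK u₀) [.rax, .rcx, .rdx] 8 ProgX.Base.L.__asan_load8_noabort.entry)
    (_h_asan_load4_noabort : Asan.SmallCheck Lay μ ProgX.Base.WayInv (ProgX.Base.CodeOK u₀) [.rax, .rcx, .rdx] 4 ProgX.Base.L.__asan_load4_noabort.entry)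
    (_h_asan_store4_noabort : Asan.SmallCheck Lay μ ProgX.Base.WayInv (ProgX.Base.CodeOK u₀) [.rax, .rcx, .rdx] 4 ProgX.Base.L.__asan_store4_noabort.entry),
    Gif.Spec.DGifGetExtension.Seg1 Lay μ u₀

end Gif.Spec.DGifGetExtension_1
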